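-- pv_equiv track=rewrite | github.com/christianebacani/Roadmap | Coding Challenges using Python and SQL/LeetCode Python Solved Problems/Easy Level/maximum_enemy_forts_that_can_be_captured.py | captureForts
-- ===== SOURCE A (Python) =====
-- def captureForts(forts: list[int]) -> int:
--     number_of_enemy_captured_while_travelling = []
--
--     for i in range(len(forts)):
--         if forts[i] != 1:
--             continue
--
--         for j in range(len(forts)):
--             if j < i and forts[j] == -1:
--                 travelled_forts = forts[j + 1 : i]
--
--             elif i < j and forts[j] == -1:
--                 travelled_forts = forts[i + 1 : j]
--
--             else:
--                 continue
--
--             if 1 not in travelled_forts and -1 not in travelled_forts: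
--                 number_of_enemy_captured_while_travelling.append(travelled_forts.count(0))
--
--     return max(number_of_enemy_captured_while_travelling, default=0)
-- ===== SOURCE B (Python) =====
-- def captureForts(forts: list[int]) -> int:
--     best = 0
--     last = 0      # last ±1 fort value seen (0 = none yet)
--     zeros = 0     # empty (0) forts seen since that last ±1 fort
--     for x in forts:
--         if x == 1 or x == -1:
--             if last == -x:
--                 best = max(best, zeros)
--             last = x
--             zeros = 0
--         elif x == 0:
--             zeros += 1
--     return best
-- ===== Notes on version B (the rewrite author's own statement) =====
-- stated objective: alternative
-- what changed: A enumerates all index pairs (i, j), builds the slice between them and scans it for 1/-1 and counts its zeros; B is a single left-to-right pass keeping only the last +-1 fort seen, the number of 0-forts since it, and the best count so far.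
import Mathlib
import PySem

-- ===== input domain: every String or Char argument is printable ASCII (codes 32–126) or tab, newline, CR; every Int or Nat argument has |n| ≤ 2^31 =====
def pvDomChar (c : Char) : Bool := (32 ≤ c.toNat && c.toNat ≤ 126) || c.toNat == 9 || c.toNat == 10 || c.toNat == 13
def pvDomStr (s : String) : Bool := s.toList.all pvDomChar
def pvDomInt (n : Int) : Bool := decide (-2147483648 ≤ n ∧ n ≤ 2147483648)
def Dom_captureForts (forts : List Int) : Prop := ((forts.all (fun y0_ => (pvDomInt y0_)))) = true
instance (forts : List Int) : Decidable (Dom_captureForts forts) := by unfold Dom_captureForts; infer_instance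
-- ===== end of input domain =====

-- B replaces A's all-pairs scan over (i, j) with slice checks by a single left-to-right pass that
-- keeps the last ±1 fort seen and the number of 0-forts since it (objective: alternative algorithm).

-- ===== PORT A =====
def captureForts (forts : List Int) : Int :=
  let n : Int := (forts.length : Int)
  let captured : List Int :=
    (PySem.List.pyRange 0 n 1).foldl (fun acc i =>
      if PySem.List.pyGetD forts i 0 ≠ 1 then acc
      else
        (PySem.List.pyRange 0 n 1).foldl (fun acc2 j =>
          if j < i ∧ PySem.List.pyGetD forts j 0 = -1 then
            let t := PySem.List.slice forts (some (j + 1)) (some i)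
            if ¬ ((1 : Int) ∈ t) ∧ ¬ ((-1 : Int) ∈ t) then acc2 ++ [(PySem.List.count t 0 : Int)]
            else acc2
          else if i < j ∧ PySem.List.pyGetD forts j 0 = -1 then
            let t := PySem.List.slice forts (some (i + 1)) (some j)
            if ¬ ((1 : Int) ∈ t) ∧ ¬ ((-1 : Int) ∈ t) then acc2 ++ [(PySem.List.count t 0 : Int)]
            else acc2
          else acc2) acc) []
  PySem.List.maxD captured (fun y => y) 0

-- ===== PORT B =====
-- state = (last ±1 fort seen or 0 for none, zeros since it, best so far)
def captureForts_alt (forts : List Int) : Int :=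
  (forts.foldl
    (fun (s : Int × Int × Int) x =>
      if x = 1 ∨ x = -1 then
        (x, 0, if s.1 = -x then max s.2.2 s.2.1 else s.2.2)
      else if x = 0 then (s.1, s.2.1 + 1, s.2.2)
      else s)
    (0, 0, 0)).2.2

-- ===== PRECONDITION & SPEC =====
def Spec_captureForts (forts : List Int) (out : Int) : Prop := out = captureForts_alt forts
instance (forts : List Int) (out : Int) : Decidable (Spec_captureForts forts out) := by unfold Spec_captureForts; infer_instance

-- ===== CLAIM (what is proved, stated in full; the proofs are below) =====
def Claim_equal_captureForts : Prop := ∀ (forts : List Int), Dom_captureForts forts → Spec_captureForts forts (captureForts forts)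

-- ===== LEMMAS AND PROOFS =====

-- m contains no ±1 marker
def pvClean (m : List Int) : Prop := ∀ x ∈ m, x ≠ 1 ∧ x ≠ -1

-- "good decomposition": c is the number of 0s between two opposite ±1 forts with no ±1 in between
def pvGD (forts : List Int) (c : Int) : Prop :=
  ∃ u a m b v, forts = u ++ a :: (m ++ b :: v) ∧
    ((a = 1 ∧ b = -1) ∨ (a = -1 ∧ b = 1)) ∧ pvClean m ∧ c = (m.count 0 : Int)

-- first-pair form: the earliest marker of xs pairs with a (z zeros already seen after a)
def pvFP (a z : Int) (xs : List Int) (c : Int) : Prop :=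
  ∃ m b v, xs = m ++ b :: v ∧ (b = 1 ∨ b = -1) ∧ a = -b ∧ pvClean m ∧ c = z + (m.count 0 : Int)

-- values of all good pairs of xs, plus the pair formed with the pending marker a
def pvAM (a z : Int) : List Int → List Int
  | [] => []
  | x :: xs =>
      if x = 1 ∨ x = -1 then (if a = -x then [z] else []) ++ pvAM x 0 xs
      else if x = 0 then pvAM a (z + 1) xs
      else pvAM a z xs

def pvLM (l : List Int) : Int := l.foldl max 0

def pvBetween (forts : List Int) (p q : Nat) : List Int := (forts.drop (p + 1)).take (q - (p + 1))

-- index form of pvGD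
def pvIdx (forts : List Int) (c : Int) : Prop :=
  ∃ p q : Nat, p < q ∧ q < forts.length ∧
    ((forts.getD p 0 = 1 ∧ forts.getD q 0 = -1) ∨ (forts.getD p 0 = -1 ∧ forts.getD q 0 = 1)) ∧
    pvClean (pvBetween forts p q) ∧ c = ((pvBetween forts p q).count 0 : Int)

-- A's inner-loop contribution for outer index i and inner index j
def pvG (forts : List Int) (i j : Int) : List Int :=
  if j < i ∧ PySem.List.pyGetD forts j 0 = -1 then
    if ¬ ((1 : Int) ∈ PySem.List.slice forts (some (j + 1)) (some i)) ∧
       ¬ ((-1 : Int) ∈ PySem.List.slice forts (some (j + 1)) (some i)) then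
      [(PySem.List.count (PySem.List.slice forts (some (j + 1)) (some i)) 0 : Int)]
    else []
  else if i < j ∧ PySem.List.pyGetD forts j 0 = -1 then
    if ¬ ((1 : Int) ∈ PySem.List.slice forts (some (i + 1)) (some j)) ∧
       ¬ ((-1 : Int) ∈ PySem.List.slice forts (some (i + 1)) (some j)) then
      [(PySem.List.count (PySem.List.slice forts (some (i + 1)) (some j)) 0 : Int)]
    else []
  else []

-- A's collected list, in flatMap form
def pvV (forts : List Int) : List Int :=
  (PySem.List.pyRange 0 (forts.length : Int) 1).flatMap (fun i =>
    if PySem.List.pyGetD forts i 0 ≠ 1 then []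
    else (PySem.List.pyRange 0 (forts.length : Int) 1).flatMap (pvG forts i))

lemma foldl_max_max (t : List Int) : ∀ p q : Int, t.foldl max (max p q) = max p (t.foldl max q) := by
  induction t with
  | nil => intro p q; rfl
  | cons y t ih =>
      intro p q
      simp only [List.foldl_cons, max_assoc]
      exact ih p (max q y)

lemma lm_cons (z : Int) (t : List Int) : pvLM (z :: t) = max z (pvLM t) := by
  simp only [pvLM, List.foldl_cons]
  rw [max_comm 0 z, foldl_max_max]

lemma lm_nonneg (l : List Int) : 0 ≤ pvLM l := (PySem.List.le_foldl_max l 0).1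

lemma foldl_max_le (t : List Int) : ∀ a m : Int, a ≤ m → (∀ x ∈ t, x ≤ m) → t.foldl max a ≤ m := by
  induction t with
  | nil => intro a m h _; exact h
  | cons y t ih =>
      intro a m h hall
      exact ih _ m (max_le h (hall y (by simp))) (fun x hx => hall x (by simp [hx]))

lemma lm_le_of_subset (l₁ l₂ : List Int) (h : ∀ x ∈ l₁, x ∈ l₂) : pvLM l₁ ≤ pvLM l₂ :=
  foldl_max_le l₁ 0 (pvLM l₂) (lm_nonneg l₂)
    (fun x hx => (PySem.List.le_foldl_max l₂ 0).2 x (h x hx))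

lemma lm_eq_of_mem_iff (l₁ l₂ : List Int) (h : ∀ x, x ∈ l₁ ↔ x ∈ l₂) : pvLM l₁ = pvLM l₂ :=
  le_antisymm (lm_le_of_subset _ _ (fun x hx => (h x).1 hx))
    (lm_le_of_subset _ _ (fun x hx => (h x).2 hx))

lemma maxD_eq_lm (l : List Int) (h : ∀ x ∈ l, 0 ≤ x) :
    PySem.List.maxD l (fun y => y) 0 = pvLM l := by
  cases l with
  | nil => rfl
  | cons x t =>
      simp only [PySem.List.maxD, PySem.List.max?_id_cons, Option.getD_some]
      have hx : (0 : Int) ≤ x := h x (by simp)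
      simp only [pvLM, List.foldl_cons, max_eq_right hx]

lemma A_eq_lm_V (forts : List Int) : captureForts forts = PySem.List.maxD (pvV forts) (fun y => y) 0 := by
  unfold captureForts pvV
  dsimp only
  congr 1
  have hbody : (fun (acc : List Int) (i : Int) =>
      if PySem.List.pyGetD forts i 0 ≠ 1 then acc
      else
        (PySem.List.pyRange 0 (forts.length : Int) 1).foldl (fun acc2 j =>
          if j < i ∧ PySem.List.pyGetD forts j 0 = -1 then
            let t := PySem.List.slice forts (some (j + 1)) (some i)
            if ¬ ((1 : Int) ∈ t) ∧ ¬ ((-1 : Int) ∈ t) then acc2 ++ [(PySem.List.count t 0 : Int)]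
            else acc2
          else if i < j ∧ PySem.List.pyGetD forts j 0 = -1 then
            let t := PySem.List.slice forts (some (i + 1)) (some j)
            if ¬ ((1 : Int) ∈ t) ∧ ¬ ((-1 : Int) ∈ t) then acc2 ++ [(PySem.List.count t 0 : Int)]
            else acc2
          else acc2) acc)
      = (fun (acc : List Int) (i : Int) => acc ++
          (if PySem.List.pyGetD forts i 0 ≠ 1 then []
           else (PySem.List.pyRange 0 (forts.length : Int) 1).flatMap (pvG forts i))) := by
    funext acc i
    by_cases h1 : PySem.List.pyGetD forts i 0 ≠ 1
    · simp [h1]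
    · rw [if_neg h1, if_neg h1]
      have hg : (fun (acc2 : List Int) (j : Int) =>
          if j < i ∧ PySem.List.pyGetD forts j 0 = -1 then
            let t := PySem.List.slice forts (some (j + 1)) (some i)
            if ¬ ((1 : Int) ∈ t) ∧ ¬ ((-1 : Int) ∈ t) then acc2 ++ [(PySem.List.count t 0 : Int)]
            else acc2
          else if i < j ∧ PySem.List.pyGetD forts j 0 = -1 then
            let t := PySem.List.slice forts (some (i + 1)) (some j)
            if ¬ ((1 : Int) ∈ t) ∧ ¬ ((-1 : Int) ∈ t) then acc2 ++ [(PySem.List.count t 0 : Int)]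
            else acc2
          else acc2)
          = (fun (acc2 : List Int) (j : Int) => acc2 ++ pvG forts i j) := by
        funext acc2 j
        simp only [pvG]
        split_ifs <;> simp
      rw [hg, PySem.List.foldl_append_eq_flatMap]
  rw [hbody, PySem.List.foldl_append_eq_flatMap]
  simp

lemma clean_iff (t : List Int) : (¬ ((1:Int) ∈ t) ∧ ¬ ((-1:Int) ∈ t)) ↔ pvClean t := by
  unfold pvClean
  constructor
  · rintro ⟨h1, h2⟩ x hx
    exact ⟨fun e => h1 (e ▸ hx), fun e => h2 (e ▸ hx)⟩
  · intro h
    exact ⟨fun hx => (h 1 hx).1 rfl, fun hx => (h (-1) hx).2 rfl⟩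

lemma slice_between (forts : List Int) (j i : Int) (hj : 0 ≤ j) (hi : 0 ≤ i) :
    PySem.List.slice forts (some (j + 1)) (some i) = pvBetween forts j.toNat i.toNat := by
  rw [PySem.List.slice_toNat forts (by omega) hi]
  unfold pvBetween
  rw [show (j + 1).toNat = j.toNat + 1 by omega]

lemma getD_cast (forts : List Int) (i : Int) (h0 : 0 ≤ i) (h1 : i < (forts.length : Int)) :
    PySem.List.pyGetD forts i 0 = forts.getD i.toNat 0 := by
  rw [PySem.List.pyGetD_eq_getElem forts 0 h0 h1, List.getD_eq_getElem forts 0 (by omega)]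

lemma V_mem (forts : List Int) (c : Int) : c ∈ pvV forts ↔ pvIdx forts c := by
  constructor
  · intro h
    simp only [pvV, List.mem_flatMap, PySem.List.mem_pyRange_one] at h
    obtain ⟨i, ⟨hi0, hin⟩, hc⟩ := h
    by_cases h1 : PySem.List.pyGetD forts i 0 ≠ 1
    · simp [h1] at hc
    · rw [if_neg h1] at hc
      rw [not_not] at h1
      simp only [List.mem_flatMap, PySem.List.mem_pyRange_one] at hc
      obtain ⟨j, ⟨hj0, hjn⟩, hcj⟩ := hc
      unfold pvG at hcj
      by_cases hb1 : j < i ∧ PySem.List.pyGetD forts j 0 = -1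
      · rw [if_pos hb1] at hcj
        by_cases hcl : ¬ ((1:Int) ∈ PySem.List.slice forts (some (j + 1)) (some i)) ∧
            ¬ ((-1:Int) ∈ PySem.List.slice forts (some (j + 1)) (some i))
        · rw [if_pos hcl, List.mem_singleton] at hcj
          refine ⟨j.toNat, i.toNat, by omega, by omega, ?_, ?_, ?_⟩
          · right
            rw [← getD_cast forts j hj0 hjn, ← getD_cast forts i hi0 hin]
            exact ⟨hb1.2, h1⟩
          · rw [← slice_between forts j i hj0 hi0]
            exact (clean_iff _).1 hcl
          · rw [← slice_between forts j i hj0 hi0]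
            exact hcj
        · rw [if_neg hcl] at hcj
          simp at hcj
      · rw [if_neg hb1] at hcj
        by_cases hb2 : i < j ∧ PySem.List.pyGetD forts j 0 = -1
        · rw [if_pos hb2] at hcj
          by_cases hcl : ¬ ((1:Int) ∈ PySem.List.slice forts (some (i + 1)) (some j)) ∧
              ¬ ((-1:Int) ∈ PySem.List.slice forts (some (i + 1)) (some j))
          · rw [if_pos hcl, List.mem_singleton] at hcj
            refine ⟨i.toNat, j.toNat, by omega, by omega, ?_, ?_, ?_⟩
            · left
              rw [← getD_cast forts j hj0 hjn, ← getD_cast forts i hi0 hin]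
              exact ⟨h1, hb2.2⟩
            · rw [← slice_between forts i j hi0 hj0]
              exact (clean_iff _).1 hcl
            · rw [← slice_between forts i j hi0 hj0]
              exact hcj
          · rw [if_neg hcl] at hcj
            simp at hcj
        · rw [if_neg hb2] at hcj
          simp at hcj
  · rintro ⟨p, q, hpq, hq, hval, hcl, hc⟩
    simp only [pvV, List.mem_flatMap, PySem.List.mem_pyRange_one]
    rcases hval with ⟨hp1, hq1⟩ | ⟨hp1, hq1⟩
    · -- forts[p] = 1 : outer i = p, inner j = q (the i < j branch)
      refine ⟨(p : Int), ⟨by omega, by omega⟩, ?_⟩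
      have hgp : PySem.List.pyGetD forts (p : Int) 0 = 1 := by
        rw [getD_cast forts _ (by omega) (by omega)]
        simpa using hp1
      rw [if_neg (by simp [hgp])]
      simp only [List.mem_flatMap, PySem.List.mem_pyRange_one]
      refine ⟨(q : Int), ⟨by omega, by omega⟩, ?_⟩
      have hgq : PySem.List.pyGetD forts (q : Int) 0 = -1 := by
        rw [getD_cast forts _ (by omega) (by omega)]
        simpa using hq1
      have hsl : PySem.List.slice forts (some ((p:Int) + 1)) (some (q:Int)) = pvBetween forts p q := by
        rw [slice_between forts _ _ (by omega) (by omega)]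
        simp
      unfold pvG
      rw [if_neg (by omega), if_pos ⟨by omega, hgq⟩, hsl, if_pos ((clean_iff _).2 hcl)]
      simp [hc]
    · -- forts[p] = -1 : outer i = q, inner j = p (the j < i branch)
      refine ⟨(q : Int), ⟨by omega, by omega⟩, ?_⟩
      have hgq : PySem.List.pyGetD forts (q : Int) 0 = 1 := by
        rw [getD_cast forts _ (by omega) (by omega)]
        simpa using hq1
      rw [if_neg (by simp [hgq])]
      simp only [List.mem_flatMap, PySem.List.mem_pyRange_one]
      refine ⟨(p : Int), ⟨by omega, by omega⟩, ?_⟩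
      have hgp : PySem.List.pyGetD forts (p : Int) 0 = -1 := by
        rw [getD_cast forts _ (by omega) (by omega)]
        simpa using hp1
      have hsl : PySem.List.slice forts (some ((p:Int) + 1)) (some (q:Int)) = pvBetween forts p q := by
        rw [slice_between forts _ _ (by omega) (by omega)]
        simp
      unfold pvG
      rw [if_pos ⟨by omega, hgp⟩, hsl, if_pos ((clean_iff _).2 hcl)]
      simp [hc]

lemma GD_iff_Idx (forts : List Int) (c : Int) : pvGD forts c ↔ pvIdx forts c := by
  constructor
  · rintro ⟨u, a, m, b, v, heq, hab, hcl, hc⟩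
    subst heq
    have hbet : pvBetween (u ++ a :: (m ++ b :: v)) u.length (u.length + m.length + 1) = m := by
      unfold pvBetween
      have hd : (u ++ a :: (m ++ b :: v)).drop (u.length + 1) = m ++ b :: v := by
        rw [show u ++ a :: (m ++ b :: v) = (u ++ [a]) ++ (m ++ b :: v) by simp,
          show u.length + 1 = (u ++ [a]).length by simp, List.drop_left]
      rw [hd, show u.length + m.length + 1 - (u.length + 1) = m.length by omega, List.take_left]
    have h1 : (u ++ a :: (m ++ b :: v)).getD u.length 0 = a := by
      rw [List.getD_append_right _ _ _ _ (le_refl u.length)]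
      simp
    have h2 : (u ++ a :: (m ++ b :: v)).getD (u.length + m.length + 1) 0 = b := by
      rw [List.getD_append_right _ _ _ _ (by omega)]
      rw [show u.length + m.length + 1 - u.length = m.length + 1 by omega]
      show (a :: (m ++ b :: v)).getD (m.length + 1) 0 = b
      simp only [List.getD_cons_succ]
      rw [List.getD_append_right _ _ _ _ (le_refl m.length)]
      simp
    refine ⟨u.length, u.length + m.length + 1, by omega, by simp; omega, ?_, ?_, ?_⟩
    · rw [h1, h2]; exact hab
    · rw [hbet]; exact hcl
    · rw [hbet]; exact hc
  · rintro ⟨p, q, hpq, hq, hval, hcl, hc⟩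
    have hp : p < forts.length := by omega
    have hsplit : forts = forts.take p ++ forts[p] ::
        (pvBetween forts p q ++ forts[q] :: forts.drop (q+1)) := by
      conv_lhs => rw [← List.take_append_drop p forts]
      congr 1
      rw [List.drop_eq_getElem_cons hp]
      congr 1
      conv_lhs => rw [← List.take_append_drop (q - (p+1)) (forts.drop (p+1))]
      unfold pvBetween
      congr 1
      rw [List.drop_drop, show p + 1 + (q - (p + 1)) = q by omega,
        List.drop_eq_getElem_cons (by omega)]
    refine ⟨forts.take p, forts[p], pvBetween forts p q, forts[q], forts.drop (q+1), hsplit, ?_, hcl, hc⟩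
    rw [List.getD_eq_getElem forts 0 hp, List.getD_eq_getElem forts 0 (by omega)] at hval
    exact hval

lemma fp_cons_marker (a z x c : Int) (xs : List Int) (hx : x = 1 ∨ x = -1) :
    pvFP a z (x :: xs) c ↔ (a = -x ∧ c = z) := by
  constructor
  · rintro ⟨m, b, v, heq, hb, hab, hclm, hc⟩
    cases m with
    | nil =>
        simp only [List.nil_append, List.cons.injEq] at heq
        obtain ⟨rfl, rfl⟩ := heq
        simp at hc
        exact ⟨hab, hc⟩
    | cons y m' =>
        simp only [List.cons_append, List.cons.injEq] at heq
        obtain ⟨rfl, _⟩ := heq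
        have := hclm x (by simp)
        rcases hx with rfl | rfl <;> simp at this
  · rintro ⟨ha, rfl⟩
    exact ⟨[], x, xs, by simp, hx, ha, by intro y hy; simp at hy, by simp⟩

lemma gd_cons_marker (x c : Int) (xs : List Int) (hx : x = 1 ∨ x = -1) :
    pvGD (x :: xs) c ↔ pvFP x 0 xs c ∨ pvGD xs c := by
  constructor
  · rintro ⟨u, a', m, b, v, heq, hab, hcl, hc⟩
    cases u with
    | nil =>
        simp only [List.nil_append, List.cons.injEq] at heq
        obtain ⟨rfl, rfl⟩ := heq
        left
        refine ⟨m, b, v, rfl, ?_, ?_, hcl, by omega⟩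
        · rcases hab with ⟨_, rfl⟩ | ⟨_, rfl⟩ <;> simp
        · rcases hab with ⟨rfl, rfl⟩ | ⟨rfl, rfl⟩ <;> norm_num
    | cons y u' =>
        simp only [List.cons_append, List.cons.injEq] at heq
        obtain ⟨rfl, rfl⟩ := heq
        exact Or.inr ⟨u', a', m, b, v, rfl, hab, hcl, hc⟩
  · rintro (⟨m, b, v, heq, hb, hab, hclm, hc⟩ | ⟨u, a', m, b, v, heq, hab, hcl, hc⟩)
    · refine ⟨[], x, m, b, v, by simp [heq], ?_, hclm, by omega⟩
      rcases hb with rfl | rfl <;> [right; left] <;> constructor <;> omega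
    · exact ⟨x :: u, a', m, b, v, by simp [heq], hab, hcl, hc⟩

lemma fp_cons_nonmarker (a z x c : Int) (xs : List Int) (hx : ¬ (x = 1 ∨ x = -1)) :
    pvFP a z (x :: xs) c ↔ pvFP a (z + (if x = 0 then 1 else 0)) xs c := by
  constructor
  · rintro ⟨m, b, v, heq, hb, hab, hclm, hc⟩
    cases m with
    | nil =>
        simp only [List.nil_append, List.cons.injEq] at heq
        obtain ⟨rfl, _⟩ := heq
        exact absurd hb hx
    | cons y m' =>
        simp only [List.cons_append, List.cons.injEq] at heq
        obtain ⟨rfl, rfl⟩ := heq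
        refine ⟨m', b, v, rfl, hb, hab, fun y hy => hclm y (by simp [hy]), ?_⟩
        rw [hc]
        by_cases h0 : x = 0
        · simp [h0]
          omega
        · simp [h0]
  · rintro ⟨m, b, v, heq, hb, hab, hclm, hc⟩
    refine ⟨x :: m, b, v, by simp [heq], hb, hab, ?_, ?_⟩
    · intro y hy
      rcases List.mem_cons.1 hy with rfl | hy'
      · exact ⟨fun h => hx (Or.inl h), fun h => hx (Or.inr h)⟩
      · exact hclm y hy'
    · rw [hc]
      by_cases h0 : x = 0
      · simp [h0]
        omega
      · simp [h0]

lemma gd_cons_nonmarker (x c : Int) (xs : List Int) (hx : ¬ (x = 1 ∨ x = -1)) :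
    pvGD (x :: xs) c ↔ pvGD xs c := by
  constructor
  · rintro ⟨u, a', m, b, v, heq, hab, hcl, hc⟩
    cases u with
    | nil =>
        simp only [List.nil_append, List.cons.injEq] at heq
        obtain ⟨rfl, _⟩ := heq
        rcases hab with ⟨rfl, _⟩ | ⟨rfl, _⟩ <;> simp at hx
    | cons y u' =>
        simp only [List.cons_append, List.cons.injEq] at heq
        obtain ⟨rfl, rfl⟩ := heq
        exact ⟨u', a', m, b, v, rfl, hab, hcl, hc⟩
  · rintro ⟨u, a', m, b, v, heq, hab, hcl, hc⟩
    exact ⟨x :: u, a', m, b, v, by simp [heq], hab, hcl, hc⟩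

lemma am_mem (xs : List Int) : ∀ a z c : Int, c ∈ pvAM a z xs ↔ pvFP a z xs c ∨ pvGD xs c := by
  induction xs with
  | nil =>
      intro a z c
      simp only [pvAM, List.not_mem_nil, false_iff]
      rintro (⟨m, b, v, heq, _⟩ | ⟨u, a', m, b, v, heq, _⟩) <;> simp at heq
  | cons x xs ih =>
      intro a z c
      by_cases hx : x = 1 ∨ x = -1
      · rw [pvAM, if_pos hx, fp_cons_marker a z x c xs hx, gd_cons_marker x c xs hx]
        simp only [List.mem_append, ih x 0 c]
        by_cases ha : a = -x
        · simp [ha]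
        · simp [ha]
      · have h2 : pvAM a z (x :: xs) = pvAM a (z + (if x = 0 then 1 else 0)) xs := by
          by_cases h0 : x = 0
          · rw [pvAM, if_neg hx, if_pos h0, h0]; norm_num
          · rw [pvAM, if_neg hx, if_neg h0, if_neg h0]; norm_num
        rw [h2, ih, fp_cons_nonmarker a z x c xs hx, gd_cons_nonmarker x c xs hx]

lemma B_run (xs : List Int) : ∀ a z best : Int, 0 ≤ z → 0 ≤ best →
    (xs.foldl
      (fun (s : Int × Int × Int) x =>
        if x = 1 ∨ x = -1 then
          (x, 0, if s.1 = -x then max s.2.2 s.2.1 else s.2.2)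
        else if x = 0 then (s.1, s.2.1 + 1, s.2.2)
        else s)
      (a, z, best)).2.2 = max best (pvLM (pvAM a z xs)) := by
  induction xs with
  | nil =>
      intro a z best hz hb
      simpa [pvAM, pvLM] using (max_eq_left hb).symm
  | cons x xs ih =>
      intro a z best hz hb
      by_cases hx : x = 1 ∨ x = -1
      · by_cases ha : a = -x
        · simp only [List.foldl_cons, if_pos hx, if_pos ha, pvAM]
          rw [ih x 0 (max best z) le_rfl (le_max_of_le_left hb)]
          rw [List.singleton_append, lm_cons, max_assoc]
        · simp only [List.foldl_cons, if_pos hx, if_neg ha, pvAM]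
          rw [ih x 0 best le_rfl hb]
          simp
      · by_cases h0 : x = 0
        · subst h0
          simp only [List.foldl_cons, pvAM]
          norm_num
          rw [ih a (z+1) best (by omega) hb]
        · simp only [List.foldl_cons, if_neg hx, if_neg h0, pvAM]
          rw [ih a z best hz hb]

lemma GD_nonneg (forts : List Int) (c : Int) (h : pvGD forts c) : 0 ≤ c := by
  obtain ⟨u, a, m, b, v, _, _, _, hc⟩ := h
  simp [hc]

lemma am00_mem (forts : List Int) (c : Int) : c ∈ pvAM 0 0 forts ↔ pvGD forts c := by
  rw [am_mem]
  constructor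
  · rintro (⟨m, b, v, _, hb, hab, _⟩ | h)
    · rcases hb with rfl | rfl <;> omega
    · exact h
  · exact Or.inr

-- ===== VERDICT (by name: the statement is the Claim_ definition above) =====
theorem captureForts_spec : Claim_equal_captureForts := by
  intro forts _
  show captureForts forts = captureForts_alt forts
  have hmemV : ∀ c, c ∈ pvV forts ↔ pvGD forts c := by
    intro c; rw [V_mem, GD_iff_Idx]
  have hA : captureForts forts = pvLM (pvV forts) := by
    rw [A_eq_lm_V, maxD_eq_lm]
    intro x hx
    exact GD_nonneg forts x ((hmemV x).1 hx)
  have hB : captureForts_alt forts = pvLM (pvAM 0 0 forts) := by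
    unfold captureForts_alt
    rw [B_run forts 0 0 0 le_rfl le_rfl]
    exact max_eq_right (lm_nonneg _)
  rw [hA, hB]
  exact lm_eq_of_mem_iff _ _ (fun x => (hmemV x).trans (am00_mem forts x).symm)
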